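-- pv_equiv track=rewrite | github.com/TheoBFAV/APP1 | client-fichier_final.py | liste_finale
-- ===== SOURCE A (Python) =====
-- def liste_finale(liste):
--
--     liste_finale=[]
--
--     sequence=[]
--
--     for lettre in liste:
--
--         if lettre not in sequence:
--
--             sequence.append(lettre)
--
--             liste_finale.append(lettre)
--
--         else :
--             i=sequence.index(lettre)
--
--             if i >=1:
--
--                 liste_finale.append(sequence[i-1])
--
--             else:
--                 liste_finale.append(sequence[len(sequence)-1])
--
--             sequence.append(sequence.pop(i))
--
--     return liste_finale
-- ===== SOURCE B (Python) =====
-- def liste_finale(liste):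
--     # Circular doubly-linked list over dicts: O(1) membership, cyclic
--     # predecessor lookup and move-to-end, instead of A's O(n) list scans.
--     prev = {}
--     nxt = {}
--     head = None
--     out = []
--     for x in liste:
--         if x not in prev:
--             if head is None:
--                 prev[x] = x
--                 nxt[x] = x
--                 head = x
--             else:
--                 t = prev[head]
--                 nxt[t] = x
--                 prev[x] = t
--                 nxt[x] = head
--                 prev[head] = x
--             out.append(x)
--         else:
--             out.append(prev[x])
--             if x == head:
--                 head = nxt[x]
--             elif x != prev[head]:
--                 p = prev[x]
--                 n = nxt[x]
--                 nxt[p] = n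
--                 prev[n] = p
--                 t = prev[head]
--                 nxt[t] = x
--                 prev[x] = t
--                 nxt[x] = head
--                 prev[head] = x
--     return out
-- ===== Notes on version B (the rewrite author's own statement) =====
-- stated objective: faster
-- what changed: A keeps the move-to-end sequence as a Python list and pays O(n) per element for membership, index, predecessor lookup and pop; B keeps the same sequence as a circular doubly-linked list stored in two dicts (prev/next) plus a head pointer, so membership, cyclic-predecessor output and move-to-end are all O(1) per element.
import Mathlib
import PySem

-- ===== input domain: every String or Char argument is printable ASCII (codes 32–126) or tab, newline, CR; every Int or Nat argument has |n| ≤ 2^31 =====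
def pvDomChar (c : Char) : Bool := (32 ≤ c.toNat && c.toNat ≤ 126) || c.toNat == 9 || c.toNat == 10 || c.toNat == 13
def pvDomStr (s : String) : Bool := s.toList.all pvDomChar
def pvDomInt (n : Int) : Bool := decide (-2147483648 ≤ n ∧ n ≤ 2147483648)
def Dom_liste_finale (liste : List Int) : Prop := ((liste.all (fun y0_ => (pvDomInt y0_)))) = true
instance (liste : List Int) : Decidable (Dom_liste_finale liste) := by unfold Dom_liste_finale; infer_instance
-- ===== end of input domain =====

-- B replaces A's O(n) list scans (membership, index, pop) by a circular doubly-linked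
-- list kept in two dicts, giving O(1) membership, cyclic-predecessor lookup and
-- move-to-end per element (measured faster; asymptotic change).


-- ===== PORT A =====
-- the loop body of A, literally: membership scan, index, predecessor by position, pop+append
def pvStepA (st : List Int × List Int) (lettre : Int) : List Int × List Int :=
  if lettre ∉ st.2 then
    (st.1 ++ [lettre], st.2 ++ [lettre])
  else
    match PySem.List.index? st.2 lettre with
    | some i =>
      let out := if 1 ≤ i then st.1 ++ [PySem.List.pyGetD st.2 ((i : Int) - 1) 0]
                 else st.1 ++ [PySem.List.pyGetD st.2 ((st.2.length : Int) - 1) 0]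
      match PySem.List.pop? st.2 (i : Int) with
      | some pr => (out, pr.2 ++ [pr.1])
      | none => (out, st.2)          -- unreachable (index? returns an in-range index)
    | none => st                     -- unreachable (lettre ∈ st.2)

def liste_finale (liste : List Int) : List Int :=
  (liste.foldl pvStepA ([], [])).1

-- ===== PORT B =====
-- the loop body of B, literally: circular doubly-linked list in two dicts + head pointer
def pvStepB (st : PySem.Dict Int Int × PySem.Dict Int Int × Option Int × List Int) (x : Int) :
    PySem.Dict Int Int × PySem.Dict Int Int × Option Int × List Int :=
  let prev := st.1
  let nxt := st.2.1
  let head := st.2.2.1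
  let out := st.2.2.2
  if PySem.Dict.contains prev x = false then
    match head with
    | none => (prev.insert x x, nxt.insert x x, some x, out ++ [x])
    | some h =>
      let t := prev.getD h 0
      ((prev.insert x t).insert h x, (nxt.insert t x).insert x h, some h, out ++ [x])
  else
    let out2 := out ++ [prev.getD x 0]
    match head with
    | none => (prev, nxt, head, out2)   -- unreachable totality guard (prev nonempty ⇒ head set)
    | some h =>
      if x = h then (prev, nxt, some (nxt.getD x 0), out2)
      else if x = prev.getD h 0 then (prev, nxt, head, out2)
      else
        let p := prev.getD x 0
        let n := nxt.getD x 0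
        let nxt1 := nxt.insert p n
        let prev1 := prev.insert n p
        let t := prev1.getD h 0
        ((prev1.insert x t).insert h x, (nxt1.insert t x).insert x h, some h, out2)

def liste_finale_alt (liste : List Int) : List Int :=
  (liste.foldl pvStepB (PySem.Dict.empty, PySem.Dict.empty, none, [])).2.2.2

-- ===== PRECONDITION & SPEC =====
def Spec_liste_finale (liste : List Int) (out : List Int) : Prop := out = liste_finale_alt liste
instance (liste : List Int) (out : List Int) : Decidable (Spec_liste_finale liste out) := by unfold Spec_liste_finale; infer_instance

-- ===== CLAIM (what is proved, stated in full; the proofs are below) =====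
def Claim_equal_liste_finale : Prop := ∀ (liste : List Int), Dom_liste_finale liste → Spec_liste_finale liste (liste_finale liste)

-- ===== LEMMAS AND PROOFS =====

-- cyclic successor of a in a list: the element after a's occurrence, wrapping to the head
def pvNextIn (hd : Int) : List Int → Int → Option Int
  | [], _ => none
  | [b], a => if a = b then some hd else none
  | b :: c :: t, a => if a = b then some c else pvNextIn hd (c :: t) a

def pvCycNext (s : List Int) (a : Int) : Option Int :=
  match s with
  | [] => none
  | h :: t => pvNextIn h (h :: t) a

def pvCycPrev (s : List Int) (a : Int) : Option Int := pvCycNext s.reverse a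

-- B's state (prev, nxt, head) represents the sequence s of A
def pvInv (s : List Int) (prev nxt : PySem.Dict Int Int) (head : Option Int) : Prop :=
  s.Nodup ∧ head = s.head? ∧
  (∀ a, PySem.Dict.get? prev a = pvCycPrev s a) ∧
  (∀ a, PySem.Dict.get? nxt a = pvCycNext s a)

theorem pvHeadD_append_left (l1 l2 : List Int) (d : Int) (h : l1 ≠ []) :
    (l1 ++ l2).headD d = l1.headD d := by
  cases l1 <;> simp_all

theorem pvHeadD_irrel (l : List Int) (d d' : Int) (h : l ≠ []) : l.headD d = l.headD d' := by
  cases l <;> simp_all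

theorem pvGetLastD_append_right (l1 l2 : List Int) (d : Int) (h : l2 ≠ []) :
    (l1 ++ l2).getLastD d = l2.getLastD d := by
  rw [List.getLastD_eq_getLast?, List.getLastD_eq_getLast?, List.getLast?_append_of_ne_nil l1 h]

theorem pvGetLastD_irrel (l : List Int) (d d' : Int) (h : l ≠ []) :
    l.getLastD d = l.getLastD d' := by
  rw [List.getLastD_eq_getLast?, List.getLastD_eq_getLast?]
  obtain ⟨y, hy⟩ := Option.isSome_iff_exists.1 (List.getLast?_isSome.2 h)
  simp [hy]

theorem pvRevHeadD (l : List Int) (d : Int) : l.reverse.headD d = l.getLastD d := by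
  simp [List.getLastD_eq_getLast?, List.head?_reverse]

theorem pvGetLastD_mem (l : List Int) (d : Int) (h : l ≠ []) : l.getLastD d ∈ l := by
  rw [List.getLastD_eq_getLast?]
  obtain ⟨y, hy⟩ := Option.isSome_iff_exists.1 (List.getLast?_isSome.2 h)
  simp [hy]
  exact List.mem_of_getLast? hy

theorem pvNodupSplit (s : List Int) (a : Int) (hnd : s.Nodup) (h : a ∈ s) :
    ∃ u r, s = u ++ a :: r ∧ a ∉ u ∧ a ∉ r := by
  obtain ⟨u, r, rfl⟩ := List.append_of_mem h
  refine ⟨u, r, rfl, ?_, ?_⟩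
  · have hd := (List.nodup_append.1 hnd).2.2
    intro hu; exact hd a hu a (by simp) rfl
  · have h2 := List.Nodup.of_append_right hnd
    simp at h2; exact h2.1

theorem pvNextIn_not_mem (hd : Int) (l : List Int) (a : Int) (h : a ∉ l) :
    pvNextIn hd l a = none := by
  induction l with
  | nil => rfl
  | cons b t ih =>
    cases t with
    | nil => simp [pvNextIn]; rintro rfl; simp at h
    | cons c t' =>
      simp at h
      simp [pvNextIn, h.1]
      exact ih (by simp [h.2.1, h.2.2])

theorem pvNextIn_split (hd : Int) (u r : List Int) (a : Int) (h : a ∉ u) :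
    pvNextIn hd (u ++ a :: r) a = some (r.headD hd) := by
  induction u with
  | nil =>
    cases r with
    | nil => simp [pvNextIn]
    | cons c t => simp [pvNextIn]
  | cons b u' ih =>
    simp at h
    have he : (b :: u') ++ a :: r = b :: (u' ++ a :: r) := by simp
    rw [he]
    cases hu : u' ++ a :: r with
    | nil => simp at hu
    | cons c t' =>
      rw [show pvNextIn hd (b :: c :: t') a = if a = b then some c else pvNextIn hd (c :: t') a from rfl]
      rw [if_neg h.1, ← hu]
      exact ih h.2

theorem pvCycNext_not_mem (s : List Int) (a : Int) (h : a ∉ s) : pvCycNext s a = none := by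
  cases s with
  | nil => rfl
  | cons b t => exact pvNextIn_not_mem b (b :: t) a h

theorem pvCycNext_split (u r : List Int) (a : Int) (h : a ∉ u) :
    pvCycNext (u ++ a :: r) a = some ((r ++ u).headD a) := by
  cases u with
  | nil =>
    show pvNextIn a (a :: r) a = _
    rw [show a :: r = [] ++ a :: r from rfl, pvNextIn_split a [] r a (by simp)]
    simp
  | cons b u' =>
    show pvNextIn b ((b :: u') ++ a :: r) a = _
    rw [pvNextIn_split b (b :: u') r a h]
    cases r <;> simp

theorem pvCycPrev_not_mem (s : List Int) (a : Int) (h : a ∉ s) : pvCycPrev s a = none := by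
  exact pvCycNext_not_mem s.reverse a (by simpa using h)

theorem pvCycPrev_split (u r : List Int) (a : Int) (h : a ∉ r) :
    pvCycPrev (u ++ a :: r) a = some ((u.reverse ++ r.reverse).headD a) := by
  unfold pvCycPrev
  have he : (u ++ a :: r).reverse = r.reverse ++ a :: u.reverse := by simp
  rw [he, pvCycNext_split r.reverse u.reverse a (by simpa using h)]

-- the cyclic predecessor of the head is the last element
theorem pvCycPrev_head (b : Int) (t_ : List Int) (hnd : (b :: t_).Nodup) :
    pvCycPrev (b :: t_) b = some ((b :: t_).getLastD 0) := by
  have hb : b ∉ t_ := by simp at hnd; exact hnd.1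
  have h1 := pvCycPrev_split [] t_ b hb
  simp only [List.nil_append, List.reverse_nil] at h1
  rw [h1, pvRevHeadD, List.getLastD_cons]

-- appending a fresh element: cyclic links change only at x, the old last and the head
theorem pvCycPrev_snoc (b : Int) (t_ : List Int) (x a : Int) (hnd : (b :: t_).Nodup)
    (hx : x ∉ b :: t_) :
    pvCycPrev ((b :: t_) ++ [x]) a =
      if a = b then some x
      else if a = x then some ((b :: t_).getLastD 0)
      else pvCycPrev (b :: t_) a := by
  simp only [List.mem_cons, not_or] at hx
  have hb : b ∉ t_ := by simp at hnd; tauto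
  by_cases ha : a = b
  · subst ha
    rw [if_pos rfl]
    have h1 := pvCycPrev_split [] (t_ ++ [x]) a (by
      simp only [List.mem_append, List.mem_singleton, not_or]
      exact ⟨hb, fun h => hx.1 h.symm⟩)
    simp only [List.nil_append, List.reverse_nil] at h1
    simp only [List.cons_append] at h1 ⊢
    rw [h1]
    simp
  · rw [if_neg ha]
    by_cases ha2 : a = x
    · subst ha2
      rw [if_pos rfl]
      have h1 := pvCycPrev_split (b :: t_) [] a (by simp)
      simp only [List.append_nil, List.reverse_nil] at h1
      rw [h1, pvRevHeadD, pvGetLastD_irrel _ a 0 (by simp)]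
    · rw [if_neg ha2]
      by_cases hm : a ∈ b :: t_
      · have hmt : a ∈ t_ := by rcases List.mem_cons.1 hm with h | h; exact absurd h ha; exact h
        obtain ⟨u1, r1, hsp, hau, har⟩ := pvNodupSplit t_ a (List.Nodup.of_cons hnd) hmt
        subst hsp
        have e1 : (b :: (u1 ++ a :: r1)) ++ [x] = (b :: u1) ++ a :: (r1 ++ [x]) := by simp
        have e2 : (b :: (u1 ++ a :: r1)) = (b :: u1) ++ a :: r1 := by simp
        rw [e1, pvCycPrev_split (b :: u1) (r1 ++ [x]) a (by
          simp only [List.mem_append, List.mem_singleton, not_or]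
          exact ⟨har, by rintro rfl; exact hx.2 hmt⟩)]
        rw [e2, pvCycPrev_split (b :: u1) r1 a har]
        rw [pvHeadD_append_left _ _ _ (by simp), pvHeadD_append_left _ _ _ (by simp)]
      · rw [pvCycPrev_not_mem _ _ (by
          simp only [List.mem_append, List.mem_singleton, not_or]
          exact ⟨hm, ha2⟩), pvCycPrev_not_mem _ _ hm]

theorem pvCycNext_snoc (b : Int) (t_ : List Int) (x a : Int) (hnd : (b :: t_).Nodup)
    (hx : x ∉ b :: t_) :
    pvCycNext ((b :: t_) ++ [x]) a =
      if a = x then some b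
      else if a = (b :: t_).getLastD 0 then some x
      else pvCycNext (b :: t_) a := by
  simp only [List.mem_cons, not_or] at hx
  by_cases ha : a = x
  · subst ha
    rw [if_pos rfl]
    have h1 := pvCycNext_split (b :: t_) [] a (by simp [List.mem_cons, not_or]; tauto)
    rw [show (b :: t_) ++ [a] = (b :: t_) ++ a :: [] from rfl, h1]
    simp
  · rw [if_neg ha]
    by_cases hm : a ∈ b :: t_
    · obtain ⟨u1, r1, hsp, hau, har⟩ := pvNodupSplit (b :: t_) a hnd hm
      cases r1 with
      | nil =>
        rw [if_pos (by rw [hsp, pvGetLastD_append_right _ _ _ (by simp)]; rfl)]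
        rw [hsp, show (u1 ++ [a]) ++ [x] = u1 ++ a :: [x] from by simp,
          pvCycNext_split u1 [x] a hau]
        simp
      | cons c r' =>
        have hlast : (b :: t_).getLastD 0 = (c :: r').getLastD 0 := by
          rw [hsp, pvGetLastD_append_right _ _ _ (by simp), List.getLastD_cons,
            pvGetLastD_irrel _ a 0 (by simp)]
        rw [if_neg (by
          rw [hlast]; intro h; rw [h] at har
          exact har (pvGetLastD_mem (c :: r') 0 (by simp)))]
        rw [hsp, show (u1 ++ a :: c :: r') ++ [x] = u1 ++ a :: (c :: r' ++ [x]) from by simp,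
          pvCycNext_split u1 (c :: r' ++ [x]) a hau,
          pvCycNext_split u1 (c :: r') a hau]
        simp
    · rw [if_neg (by intro h; rw [h] at hm; exact hm (pvGetLastD_mem (b :: t_) 0 (by simp)))]
      rw [pvCycNext_not_mem _ _ (by
        simp only [List.mem_append, List.mem_singleton, not_or]
        exact ⟨hm, ha⟩), pvCycNext_not_mem _ _ hm]

-- rotating the list does not change the cyclic links
theorem pvCycNext_rotate (b : Int) (t_ : List Int) (a : Int) (hnd : (b :: t_).Nodup) :
    pvCycNext (t_ ++ [b]) a = pvCycNext (b :: t_) a := by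
  have hb : b ∉ t_ := by simp at hnd; exact hnd.1
  by_cases ha : a = b
  · subst ha
    rw [show t_ ++ [a] = t_ ++ a :: [] from rfl, pvCycNext_split t_ [] a hb,
      show a :: t_ = [] ++ a :: t_ from rfl, pvCycNext_split [] t_ a (by simp)]
    simp
  · by_cases hm : a ∈ t_
    · obtain ⟨u1, r1, hsp, hau, har⟩ := pvNodupSplit t_ a (List.Nodup.of_cons hnd) hm
      rw [hsp, show (u1 ++ a :: r1) ++ [b] = u1 ++ a :: (r1 ++ [b]) from by simp,
        pvCycNext_split u1 (r1 ++ [b]) a hau,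
        show b :: (u1 ++ a :: r1) = (b :: u1) ++ a :: r1 from by simp,
        pvCycNext_split (b :: u1) r1 a (by simp [List.mem_cons, not_or]; tauto)]
      simp
    · rw [pvCycNext_not_mem _ _ (by
        simp only [List.mem_append, List.mem_singleton, not_or]; exact ⟨hm, ha⟩),
        pvCycNext_not_mem _ _ (by simp [List.mem_cons, not_or]; tauto)]

theorem pvCycPrev_rotate (b : Int) (t_ : List Int) (a : Int) (hnd : (b :: t_).Nodup) :
    pvCycPrev (t_ ++ [b]) a = pvCycPrev (b :: t_) a := by
  unfold pvCycPrev
  have e1 : (t_ ++ [b]).reverse = b :: t_.reverse := by simp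
  have e2 : (b :: t_).reverse = t_.reverse ++ [b] := by simp
  rw [e1, e2]
  exact (pvCycNext_rotate b t_.reverse a (by simp at hnd ⊢; tauto)).symm

-- moving an interior element to the end rewires exactly three links
theorem pvCycNext_move (u r : List Int) (x a : Int) (hnd : (u ++ x :: r).Nodup)
    (hu : u ≠ []) (hr : r ≠ []) :
    pvCycNext (u ++ r ++ [x]) a =
      if a = x then some (u.headD 0)
      else if a = r.getLastD 0 then some x
      else if a = u.getLastD 0 then some (r.headD 0)
      else pvCycNext (u ++ x :: r) a := by
  have hndu : u.Nodup := hnd.of_append_left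
  have hrest : (x :: r).Nodup := List.Nodup.of_append_right hnd
  have hndr : r.Nodup := hrest.of_cons
  have hxr : x ∉ r := by simp at hrest; tauto
  have hdisj := (List.nodup_append.1 hnd).2.2
  have hxu : x ∉ u := fun h => hdisj x h x (by simp) rfl
  have hur : ∀ b ∈ u, b ∉ r := fun b hb hbr => hdisj b hb b (by simp [hbr]) rfl
  by_cases hax : a = x
  · subst hax
    rw [if_pos rfl]
    rw [show u ++ r ++ [a] = (u ++ r) ++ a :: [] from by simp,
      pvCycNext_split (u ++ r) [] a (by simp [List.mem_append]; tauto)]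
    simp only [List.nil_append]
    rw [pvHeadD_append_left _ _ _ hu, pvHeadD_irrel u a 0 hu]
  · rw [if_neg hax]
    by_cases hm : a ∈ u
    · have hanr : a ∉ r := hur a hm
      rw [if_neg (by intro h; rw [h] at hanr; exact hanr (pvGetLastD_mem r 0 hr))]
      obtain ⟨u1, u2, hu12, hau1, hau2⟩ := pvNodupSplit u a hndu hm
      subst hu12
      cases u2 with
      | nil =>
        rw [if_pos (by rw [pvGetLastD_append_right _ _ _ (by simp)]; rfl)]
        rw [show (u1 ++ [a]) ++ r ++ [x] = u1 ++ a :: (r ++ [x]) from by simp,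
          pvCycNext_split u1 (r ++ [x]) a hau1,
          pvHeadD_append_left _ _ _ (by simp [hr]), pvHeadD_append_left _ _ _ hr,
          pvHeadD_irrel r a 0 hr]
      | cons c u2' =>
        rw [if_neg (by
          rw [pvGetLastD_append_right _ _ _ (by simp), List.getLastD_cons,
            pvGetLastD_irrel _ a 0 (by simp)]
          intro h; rw [h] at hau2
          exact hau2 (pvGetLastD_mem (c :: u2') 0 (by simp)))]
        rw [show (u1 ++ a :: c :: u2') ++ r ++ [x] = u1 ++ a :: (c :: u2' ++ r ++ [x]) from by simp,
          pvCycNext_split u1 _ a hau1,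
          show (u1 ++ a :: c :: u2') ++ x :: r = u1 ++ a :: (c :: u2' ++ x :: r) from by simp,
          pvCycNext_split u1 _ a hau1]
        simp
    · by_cases hmr : a ∈ r
      · obtain ⟨r1, r2, hr12, har1, har2⟩ := pvNodupSplit r a hndr hmr
        subst hr12
        cases r2 with
        | nil =>
          rw [if_pos (by rw [pvGetLastD_append_right _ _ _ (by simp)]; rfl)]
          rw [show u ++ (r1 ++ [a]) ++ [x] = (u ++ r1) ++ a :: [x] from by simp,
            pvCycNext_split (u ++ r1) [x] a (by simp [List.mem_append]; tauto)]
          simp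
        | cons c r2' =>
          rw [if_neg (by
            rw [pvGetLastD_append_right _ _ _ (by simp), List.getLastD_cons,
              pvGetLastD_irrel _ a 0 (by simp)]
            intro h; rw [h] at har2
            exact har2 (pvGetLastD_mem (c :: r2') 0 (by simp)))]
          rw [if_neg (by intro h; rw [h] at hm; exact hm (pvGetLastD_mem u 0 hu))]
          rw [show u ++ (r1 ++ a :: c :: r2') ++ [x] = (u ++ r1) ++ a :: (c :: r2' ++ [x]) from by simp,
            pvCycNext_split (u ++ r1) _ a (by simp [List.mem_append]; tauto),
            show u ++ x :: (r1 ++ a :: c :: r2') = (u ++ x :: r1) ++ a :: (c :: r2') from by simp,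
            pvCycNext_split (u ++ x :: r1) _ a (by simp [List.mem_append]; tauto)]
          simp
      · rw [if_neg (by intro h; rw [h] at hmr; exact hmr (pvGetLastD_mem r 0 hr)),
          if_neg (by intro h; rw [h] at hm; exact hm (pvGetLastD_mem u 0 hu)),
          pvCycNext_not_mem _ _ (by simp [List.mem_append]; tauto),
          pvCycNext_not_mem _ _ (by simp [List.mem_append]; tauto)]

theorem pvCycPrev_move (u r : List Int) (x a : Int) (hnd : (u ++ x :: r).Nodup)
    (hu : u ≠ []) (hr : r ≠ []) :
    pvCycPrev (u ++ r ++ [x]) a =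
      if a = u.headD 0 then some x
      else if a = x then some (r.getLastD 0)
      else if a = r.headD 0 then some (u.getLastD 0)
      else pvCycPrev (u ++ x :: r) a := by
  have hndu : u.Nodup := hnd.of_append_left
  have hrest : (x :: r).Nodup := List.Nodup.of_append_right hnd
  have hndr : r.Nodup := hrest.of_cons
  have hxr : x ∉ r := by simp at hrest; tauto
  have hdisj := (List.nodup_append.1 hnd).2.2
  have hxu : x ∉ u := fun h => hdisj x h x (by simp) rfl
  have hur : ∀ b ∈ u, b ∉ r := fun b hb hbr => hdisj b hb b (by simp [hbr]) rfl
  obtain ⟨b, u', rfl⟩ : ∃ b u', u = b :: u' := by cases u with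
    | nil => exact absurd rfl hu
    | cons b u' => exact ⟨b, u', rfl⟩
  by_cases hah : a = b
  · subst hah
    rw [if_pos (by simp)]
    have hnm : a ∉ u' ++ r ++ [x] := by
      simp only [List.mem_append, List.mem_singleton, not_or]
      refine ⟨⟨by simp at hndu; tauto, fun h => hur a (by simp) h⟩, fun h => hxu (h ▸ by simp)⟩
    rw [show (a :: u') ++ r ++ [x] = [] ++ a :: (u' ++ r ++ [x]) from by simp,
      pvCycPrev_split [] _ a hnm]
    simp
  · rw [if_neg (by simpa using hah)]
    by_cases hax : a = x
    · subst hax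
      rw [if_pos rfl]
      rw [show (b :: u') ++ r ++ [a] = ((b :: u') ++ r) ++ a :: [] from by simp,
        pvCycPrev_split ((b :: u') ++ r) [] a (by simp)]
      rw [List.reverse_nil, List.append_nil, List.reverse_append,
        pvHeadD_append_left _ _ _ (by simp [hr]), pvRevHeadD, pvGetLastD_irrel r a 0 hr]
    · rw [if_neg hax]
      by_cases har1 : a = r.headD 0
      · obtain ⟨c, r', rfl⟩ : ∃ c r', r = c :: r' := by cases r with
          | nil => exact absurd rfl hr
          | cons c r' => exact ⟨c, r', rfl⟩
        simp only [List.headD_cons] at har1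
        subst har1
        rw [if_pos (by simp)]
        have hnm : a ∉ r' ++ [x] := by
          simp only [List.mem_append, List.mem_singleton, not_or]
          exact ⟨by simp at hndr; tauto, hax⟩
        rw [show (b :: u') ++ (a :: r') ++ [x] = (b :: u') ++ a :: (r' ++ [x]) from by simp,
          pvCycPrev_split (b :: u') _ a hnm,
          pvHeadD_append_left _ _ _ (by simp), pvRevHeadD,
          pvGetLastD_irrel _ a 0 (by simp)]
      · rw [if_neg har1]
        by_cases hm : a ∈ b :: u'
        · obtain ⟨u1, u2, hu12, hau1, hau2⟩ := pvNodupSplit _ a hndu hm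
          have hu1ne : u1 ≠ [] := by
            intro h; rw [h] at hu12; simp at hu12
            exact hah hu12.1.symm
          have hnm : a ∉ u2 ++ x :: r := by
            simp only [List.mem_append, List.mem_cons, not_or]
            refine ⟨hau2, hax, fun h => hur a (hu12 ▸ by simp) h⟩
          rw [hu12,
            show (u1 ++ a :: u2) ++ r ++ [x] = u1 ++ a :: (u2 ++ r ++ [x]) from by simp,
            pvCycPrev_split u1 _ a (by
              simp only [List.mem_append, List.mem_singleton, not_or]
              simp only [List.mem_append, List.mem_cons, not_or] at hnm
              exact ⟨⟨hnm.1, hnm.2.2⟩, hnm.2.1⟩),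
            show (u1 ++ a :: u2) ++ x :: r = u1 ++ a :: (u2 ++ x :: r) from by simp,
            pvCycPrev_split u1 _ a hnm,
            pvHeadD_append_left _ _ _ (by simp [hu1ne]),
            pvHeadD_append_left _ _ _ (by simp [hu1ne])]
        · by_cases hmr : a ∈ r
          · obtain ⟨r1, r2, hr12, hr1a, hr2a⟩ := pvNodupSplit r a hndr hmr
            have hr1ne : r1 ≠ [] := by
              intro h; rw [h] at hr12; rw [hr12] at har1; simp at har1
            rw [hr12,
              show (b :: u') ++ (r1 ++ a :: r2) ++ [x] = ((b :: u') ++ r1) ++ a :: (r2 ++ [x]) from by simp,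
              pvCycPrev_split _ _ a (by
                simp only [List.mem_append, List.mem_singleton, not_or]
                exact ⟨hr2a, hax⟩),
              show (b :: u') ++ x :: (r1 ++ a :: r2) = ((b :: u') ++ x :: r1) ++ a :: r2 from by simp,
              pvCycPrev_split _ _ a hr2a]
            have e1 : ((b :: u') ++ r1).reverse ++ (r2 ++ [x]).reverse
                = r1.reverse ++ ((b :: u').reverse ++ (r2 ++ [x]).reverse) := by simp
            have e2 : ((b :: u') ++ x :: r1).reverse ++ r2.reverse
                = r1.reverse ++ (x :: ((b :: u').reverse ++ r2.reverse)) := by simp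
            rw [e1, e2, pvHeadD_append_left _ _ _ (by simp [hr1ne]),
              pvHeadD_append_left _ _ _ (by simp [hr1ne])]
          · rw [pvCycPrev_not_mem _ _ (by simp [List.mem_append]; tauto),
              pvCycPrev_not_mem _ _ (by simp [List.mem_append]; tauto)]

theorem pvGetElem_prefix_last (b : Int) (l l2 : List Int) (h : l.length < (b :: (l ++ l2)).length) :
    (b :: (l ++ l2))[l.length] = l.getLast?.getD b := by
  induction l generalizing b with
  | nil => rfl
  | cons c t ih =>
    simp only [List.cons_append, List.length_cons, List.getElem_cons_succ]
    rw [ih c (by simp)]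
    cases t with
    | nil => simp
    | cons hd tl =>
      obtain ⟨y, hy⟩ := Option.isSome_iff_exists.1
        (List.getLast?_isSome.2 (by simp : (hd :: tl) ≠ []))
      simp [hy]

theorem pvCons_getElem_last (x : Int) (r : List Int) (h : r.length < (x :: r).length) :
    (x :: r)[r.length] = r.getLast?.getD x := by
  have := pvGetElem_prefix_last x r [] (by simp)
  simpa using this

-- A's loop body on a repeated element, in decomposed form
theorem pvStepA_mem (out u r : List Int) (x : Int) (hxu : x ∉ u) (_hxr : x ∉ r) :
    pvStepA (out, u ++ x :: r) x =
      (out ++ [(u.reverse ++ r.reverse).headD x], u ++ r ++ [x]) := by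
  have hmem : x ∈ u ++ x :: r := by simp
  have herase : (u ++ x :: r).eraseIdx u.length = u ++ r := by
    induction u with
    | nil => rfl
    | cons b t ih => simpa using ih (fun h => hxu (List.mem_cons_of_mem b h))
  have hgetx : (u ++ x :: r)[u.length]'(by simp) = x := by
    rw [List.getElem_append_right (le_refl u.length)]; simp
  have hidx : PySem.List.index? (u ++ x :: r) x = some u.length :=
    (PySem.List.index?_eq_some_iff _ _ _).2 ⟨u, r, rfl, rfl, hxu⟩
  have hpop : PySem.List.pop? (u ++ x :: r) ((u.length : Nat) : Int)
      = some (x, u ++ r) := by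
    rw [PySem.List.pop?_natCast _ _ (by simp)]
    rw [herase]; rw [hgetx]
  unfold pvStepA
  rw [if_neg (fun h => h hmem)]
  rw [hidx]
  cases u with
  | nil =>
    simp only [List.nil_append] at hpop ⊢
    simp [pvCons_getElem_last]
  | cons b u' =>
    have hpop' : PySem.List.pop? (b :: (u' ++ x :: r)) ((u'.length : Int) + 1)
        = some (x, b :: (u' ++ r)) := by simpa using hpop
    simp [hpop', pvGetElem_prefix_last]

theorem pvStep_sim (s : List Int) (prev nxt : PySem.Dict Int Int) (head : Option Int)
    (out : List Int) (x : Int) (h : pvInv s prev nxt head) :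
    (pvStepB (prev, nxt, head, out) x).2.2.2 = (pvStepA (out, s) x).1 ∧
    pvInv (pvStepA (out, s) x).2 (pvStepB (prev, nxt, head, out) x).1
      (pvStepB (prev, nxt, head, out) x).2.1 (pvStepB (prev, nxt, head, out) x).2.2.1 := by
  obtain ⟨hnd, hhead, hprev, hnxt⟩ := h
  subst hhead
  by_cases hx : x ∈ s
  · obtain ⟨u, r, rfl, hxu, hxr⟩ := pvNodupSplit s x hnd hx
    have hctrue : PySem.Dict.contains prev x = true := by
      rw [PySem.Dict.contains_eq_isSome_get?, hprev x, pvCycPrev_split u r x hxr]; rfl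
    have hgx : prev.getD x 0 = (u.reverse ++ r.reverse).headD x := by
      rw [PySem.Dict.getD_eq_get?_getD, hprev x, pvCycPrev_split u r x hxr]; rfl
    rw [pvStepA_mem out u r x hxu hxr]
    cases u with
    | nil =>
      simp only [List.nil_append] at hnd hprev hnxt hctrue hgx ⊢
      have hB : pvStepB (prev, nxt, (x :: r).head?, out) x
          = (prev, nxt, some (nxt.getD x 0), out ++ [prev.getD x 0]) := by
        simp [pvStepB, hctrue]
      rw [hB]
      have hnx : nxt.getD x 0 = r.headD x := by
        rw [PySem.Dict.getD_eq_get?_getD, hnxt x,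
          show x :: r = [] ++ x :: r from rfl, pvCycNext_split [] r x (by simp)]
        simp
      refine ⟨by simp [hgx], ?_, ?_, fun a => ?_, fun a => ?_⟩
      · exact (List.perm_append_singleton x r).symm.nodup hnd
      · show some (nxt.getD x 0) = (r ++ [x]).head?
        rw [hnx]; cases r <;> simp
      · show PySem.Dict.get? prev a = pvCycPrev (r ++ [x]) a
        rw [pvCycPrev_rotate x r a hnd]; exact hprev a
      · show PySem.Dict.get? nxt a = pvCycNext (r ++ [x]) a
        rw [pvCycNext_rotate x r a hnd]; exact hnxt a
    | cons b u' =>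
      have hnd' : (b :: (u' ++ x :: r)).Nodup := by simpa using hnd
      have hbnm : b ∉ u' ++ x :: r := by
        simp only [List.mem_append, List.mem_cons, not_or]
        simp at hnd'; tauto
      have hxb : x ≠ b := by
        intro hh; exact hxu (hh ▸ List.mem_cons_self)
      have hgb : prev.getD b 0 = (u' ++ x :: r).getLastD b := by
        rw [PySem.Dict.getD_eq_get?_getD, hprev b,
          show (b :: u') ++ x :: r = [] ++ b :: (u' ++ x :: r) from by simp,
          pvCycPrev_split [] (u' ++ x :: r) b hbnm]
        simp only [Option.getD_some, List.reverse_nil, List.nil_append, pvRevHeadD]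
      cases r with
      | nil =>
        have hgb0 : prev.getD b 0 = x := by
          rw [hgb, pvGetLastD_append_right _ _ _ (by simp)]; rfl
        have hB : pvStepB (prev, nxt, ((b :: u') ++ x :: []).head?, out) x
            = (prev, nxt, some b, out ++ [prev.getD x 0]) := by
          simp [pvStepB, hctrue, hxb, hgb0]
        rw [hB]
        refine ⟨by rw [hgx], ?_⟩
        rw [show (b :: u') ++ [] ++ [x] = (b :: u') ++ x :: [] from by simp]
        exact ⟨hnd, by simp, hprev, hnxt⟩
      | cons c r' =>
        have hgb2 : prev.getD b 0 = (c :: r').getLastD 0 := by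
          rw [hgb, pvGetLastD_append_right _ _ _ (by simp), List.getLastD_cons,
            pvGetLastD_irrel _ x 0 (by simp)]
        have hxgb : x ≠ prev.getD b 0 := by
          rw [hgb2]; intro hh
          exact hxr (hh ▸ pvGetLastD_mem (c :: r') 0 (by simp))
        have hn : nxt.getD x 0 = c := by
          rw [PySem.Dict.getD_eq_get?_getD, hnxt x, pvCycNext_split (b :: u') (c :: r') x hxu]
          simp
        have hp : prev.getD x 0 = (b :: u').getLastD 0 := by
          rw [hgx, pvHeadD_append_left _ _ _ (by simp), pvRevHeadD,
            pvGetLastD_irrel _ x 0 (by simp)]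
        have hbn : b ≠ c := by
          have := (List.nodup_append.1 hnd).2.2
          exact this b (by simp) c (by simp)
        have ht : (prev.insert (nxt.getD x 0) (prev.getD x 0)).getD b 0
            = (c :: r').getLastD 0 := by
          rw [PySem.Dict.getD_insert, if_neg (by rw [hn]; exact hbn)]
          exact hgb2
        have hB : pvStepB (prev, nxt, ((b :: u') ++ x :: c :: r').head?, out) x
            = (((prev.insert (nxt.getD x 0) (prev.getD x 0)).insert x
                  ((prev.insert (nxt.getD x 0) (prev.getD x 0)).getD b 0)).insert b x,
               ((nxt.insert (prev.getD x 0) (nxt.getD x 0)).insert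
                  ((prev.insert (nxt.getD x 0) (prev.getD x 0)).getD b 0) x).insert x b,
               some b, out ++ [prev.getD x 0]) := by
          simp [pvStepB, hctrue, hxb, hxgb]
        rw [hB, ht, hn, hp]
        refine ⟨?_, ?_, by simp, fun a => ?_, fun a => ?_⟩
        · show out ++ [(b :: u').getLastD 0]
            = out ++ [((b :: u').reverse ++ (c :: r').reverse).headD x]
          rw [← hp, hgx]
        · have hperm : ((b :: u') ++ (c :: r') ++ [x]).Perm ((b :: u') ++ x :: c :: r') := by
            rw [List.append_assoc]
            exact List.Perm.append_left _ (List.perm_append_singleton x (c :: r'))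
          exact hperm.symm.nodup hnd
        · show PySem.Dict.get? _ a = pvCycPrev ((b :: u') ++ (c :: r') ++ [x]) a
          rw [pvCycPrev_move (b :: u') (c :: r') x a hnd (by simp) (by simp)]
          simp only [PySem.Dict.get?_insert, List.headD_cons]
          rw [hprev a]
          rfl
        · show PySem.Dict.get? _ a = pvCycNext ((b :: u') ++ (c :: r') ++ [x]) a
          rw [pvCycNext_move (b :: u') (c :: r') x a hnd (by simp) (by simp)]
          simp only [PySem.Dict.get?_insert, List.headD_cons]
          rw [hnxt a]
  · have hcfalse : PySem.Dict.contains prev x = false := by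
      rw [PySem.Dict.contains_eq_isSome_get?, hprev x, pvCycPrev_not_mem s x hx]; rfl
    have hA : pvStepA (out, s) x = (out ++ [x], s ++ [x]) := by
      simp [pvStepA, hx]
    rw [hA]
    cases s with
    | nil =>
      have hB : pvStepB (prev, nxt, ([] : List Int).head?, out) x
          = (prev.insert x x, nxt.insert x x, some x, out ++ [x]) := by
        simp [pvStepB, hcfalse]
      rw [hB]
      have hpx : pvCycPrev ([] ++ [x]) x = some x := by
        have := pvCycPrev_split [] [] x (by simp); simpa using this
      have hnx : pvCycNext ([] ++ [x]) x = some x := by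
        have := pvCycNext_split [] [] x (by simp); simpa using this
      refine ⟨rfl, by simp, by simp, fun a => ?_, fun a => ?_⟩
      · rw [PySem.Dict.get?_insert]
        by_cases hax : a = x
        · subst hax; rw [if_pos rfl, hpx]
        · rw [if_neg hax, hprev a, pvCycPrev_not_mem [] a (by simp),
            pvCycPrev_not_mem ([] ++ [x]) a (by simpa using hax)]
      · rw [PySem.Dict.get?_insert]
        by_cases hax : a = x
        · subst hax; rw [if_pos rfl, hnx]
        · rw [if_neg hax, hnxt a, pvCycNext_not_mem [] a (by simp),
            pvCycNext_not_mem ([] ++ [x]) a (by simpa using hax)]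
    | cons b t_ =>
      have hgb : prev.getD b 0 = (b :: t_).getLastD 0 := by
        rw [PySem.Dict.getD_eq_get?_getD, hprev b, pvCycPrev_head b t_ hnd]; rfl
      have hB : pvStepB (prev, nxt, (b :: t_).head?, out) x
          = ((prev.insert x (prev.getD b 0)).insert b x,
             (nxt.insert (prev.getD b 0) x).insert x b, some b, out ++ [x]) := by
        simp [pvStepB, hcfalse]
      rw [hB, hgb]
      refine ⟨rfl, ?_, by simp, fun a => ?_, fun a => ?_⟩
      · show ((b :: t_) ++ [x]).Nodup
        simp only [List.nodup_append]
        refine ⟨hnd, by simp, ?_⟩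
        intro y hy z hz
        simp at hz; subst hz
        intro hh; exact hx (hh ▸ hy)
      · show PySem.Dict.get? _ a = pvCycPrev ((b :: t_) ++ [x]) a
        rw [pvCycPrev_snoc b t_ x a hnd hx]
        simp only [PySem.Dict.get?_insert]
        rw [hprev a]
      · show PySem.Dict.get? _ a = pvCycNext ((b :: t_) ++ [x]) a
        rw [pvCycNext_snoc b t_ x a hnd hx]
        simp only [PySem.Dict.get?_insert]
        rw [hnxt a]

theorem pvSim (l : List Int) : ∀ (s : List Int) (prev nxt : PySem.Dict Int Int)
    (head : Option Int) (out : List Int), pvInv s prev nxt head →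
    (List.foldl pvStepA (out, s) l).1 = (List.foldl pvStepB (prev, nxt, head, out) l).2.2.2 := by
  induction l with
  | nil => intro s prev nxt head out _; rfl
  | cons x l ih =>
    intro s prev nxt head out h
    obtain ⟨hout, hinv⟩ := pvStep_sim s prev nxt head out x h
    have hB : pvStepB (prev, nxt, head, out) x =
        ((pvStepB (prev, nxt, head, out) x).1, (pvStepB (prev, nxt, head, out) x).2.1,
         (pvStepB (prev, nxt, head, out) x).2.2.1, (pvStepA (out, s) x).1) := by
      rw [← hout]
    have hA : pvStepA (out, s) x = ((pvStepA (out, s) x).1, (pvStepA (out, s) x).2) := rfl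
    rw [List.foldl_cons, List.foldl_cons, hA, hB]
    exact ih _ _ _ _ _ hinv

-- ===== VERDICT (by name: the statement is the Claim_ definition above) =====
theorem liste_finale_spec : Claim_equal_liste_finale := by
  intro liste _
  unfold Spec_liste_finale liste_finale liste_finale_alt
  exact pvSim liste [] PySem.Dict.empty PySem.Dict.empty none []
    ⟨List.nodup_nil, rfl,
     fun a => by simp [PySem.Dict.get?_empty, pvCycPrev, pvCycNext],
     fun a => by simp [PySem.Dict.get?_empty, pvCycNext]⟩
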